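-- pv_equiv track=rewrite | github.com/abhinavcodes/competitive | hackerrank/algorithms/implementation/birthday-chocalate.py | solve
-- ===== SOURCE A (Python) =====
-- def solve(n, s, d, m):
--     b = 0
--     count = 0
--     while b < n:
--         c = sum(s[b:(m+b)])
--         if c == d:
--             count += 1
--         b += 1
--     return count
-- ===== SOURCE B (Python) =====
-- def solve(n, s, d, m):
--     # Prefix sums give each window sum in O(1); slice.indices clamps the
--     # window bounds to the list exactly as slicing does.
--     L = len(s)
--     P = [0]
--     t = 0
--     for x in s:
--         t += x
--         P.append(t)
--     count = 0
--     for b in range(n):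
--         lo, hi, _ = slice(b, b + m).indices(L)
--         if P[max(hi, lo)] - P[lo] == d:
--             count += 1
--     return count
-- ===== Notes on version B (the rewrite author's own statement) =====
-- stated objective: faster
-- what changed: Replaces re-summing each slice (O(m) per window) with a prefix-sum table, reading each window sum in O(1) via slice.indices-clamped bounds.
import Mathlib
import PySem

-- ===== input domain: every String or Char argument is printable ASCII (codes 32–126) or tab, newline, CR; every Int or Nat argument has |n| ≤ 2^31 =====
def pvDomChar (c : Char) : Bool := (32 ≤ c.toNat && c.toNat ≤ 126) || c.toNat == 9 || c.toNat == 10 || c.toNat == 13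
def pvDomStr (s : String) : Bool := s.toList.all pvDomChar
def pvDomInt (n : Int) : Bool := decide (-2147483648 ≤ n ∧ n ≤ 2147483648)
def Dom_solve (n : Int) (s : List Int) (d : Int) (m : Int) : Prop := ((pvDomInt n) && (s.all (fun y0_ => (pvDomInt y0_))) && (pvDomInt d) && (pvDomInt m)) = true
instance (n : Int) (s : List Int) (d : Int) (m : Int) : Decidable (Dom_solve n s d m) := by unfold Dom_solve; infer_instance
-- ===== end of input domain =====

-- B replaces per-window slice re-summing with a prefix-sum table read at the
-- slice-clamped window bounds (objective: faster).

-- ===== PORT A =====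
def solveLoopA (s : List Int) (d : Int) (m : Int) (n : Int) (b : Int) (count : Int) : Int :=
  if b < n then
    let c := (PySem.List.slice s (some b) (some (m + b))).sum
    solveLoopA s d m n (b + 1) (if c = d then count + 1 else count)
  else count
termination_by (n - b).toNat
decreasing_by omega

def solve (n : Int) (s : List Int) (d : Int) (m : Int) : Int :=
  solveLoopA s d m n 0 0

-- ===== PORT B =====
def solve_alt (n : Int) (s : List Int) (d : Int) (m : Int) : Int :=
  let P := (s.foldl (fun (st : List Int × Int) x => (st.1 ++ [st.2 + x], st.2 + x)) ([0], 0)).1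
  (PySem.List.pyRange 0 n 1).foldl (fun count b =>
    -- slice(b, b+m).indices(L) with step 1: the clamped start/stop are exactly
    -- PySem.List.clampIdx s.length, applied to b and b+m
    let lo : Int := (PySem.List.clampIdx s.length b : Nat)
    let hi : Int := (PySem.List.clampIdx s.length (b + m) : Nat)
    if PySem.List.pyGetD P (max hi lo) 0 - PySem.List.pyGetD P lo 0 = d
    then count + 1 else count) 0

-- ===== PRECONDITION & SPEC =====
def Spec_solve (n : Int) (s : List Int) (d : Int) (m : Int) (out : Int) : Prop := out = solve_alt n s d m
instance (n : Int) (s : List Int) (d : Int) (m : Int) (out : Int) : Decidable (Spec_solve n s d m out) := by unfold Spec_solve; infer_instance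

-- ===== CLAIM =====
def Claim_equal_solve : Prop := ∀ (n : Int) (s : List Int) (d : Int) (m : Int), Dom_solve n s d m → Spec_solve n s d m (solve n s d m)

-- ===== LEMMAS AND PROOFS =====
-- partial sums of s starting from running total t (proof helper)
def psums (t : Int) : List Int → List Int
  | [] => []
  | x :: xs => (t + x) :: psums (t + x) xs

theorem psums_spec : ∀ (s : List Int) (t : Int) (acc : List Int),
    s.foldl (fun (st : List Int × Int) x => (st.1 ++ [st.2 + x], st.2 + x)) (acc, t)
      = (acc ++ psums t s, t + s.sum) := by
  intro s
  induction s with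
  | nil => intro t acc; simp [psums]
  | cons x xs ih =>
    intro t acc
    simp only [List.foldl_cons, psums, ih (t + x) (acc ++ [t + x])]
    simp [add_assoc]

theorem psums_getD : ∀ (s : List Int) (t : Int) (i : Nat), i ≤ s.length →
    (t :: psums t s).getD i 0 = t + (s.take i).sum := by
  intro s
  induction s with
  | nil =>
    intro t i h
    simp only [List.length_nil, Nat.le_zero] at h
    subst h; simp
  | cons x xs ih =>
    intro t i h
    cases i with
    | zero => simp
    | succ j =>
      simp only [psums, List.getD_cons_succ, List.take_succ_cons, List.sum_cons]
      have := ih (t + x) j (by simpa using h)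
      simp only [this]; ring

-- reading the B-side prefix list at an in-range index
theorem pgetD_eq (s : List Int) (i : Nat) (h1 : i ≤ s.length) :
    PySem.List.pyGetD ((s.foldl (fun (st : List Int × Int) x => (st.1 ++ [st.2 + x], st.2 + x)) ([0], 0)).1) (i : Int) 0
      = (s.take i).sum := by
  rw [psums_spec s 0 [0], PySem.List.pyGetD_natCast]
  simpa using psums_getD s 0 i h1

theorem sum_take_drop (s : List Int) (j k : Nat) :
    ((s.drop j).take k).sum = (s.take (j + k)).sum - (s.take j).sum := by
  have h : s.take (j + k) = s.take j ++ (s.drop j).take k := by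
    rw [List.take_add]
  rw [h, List.sum_append]; ring

-- A's window sum equals B's prefix-sum difference at the clamped bounds (any 0 ≤ b)
theorem window_eq (s : List Int) (m b : Int) :
    (PySem.List.slice s (some b) (some (m + b))).sum
      = PySem.List.pyGetD ((s.foldl (fun (st : List Int × Int) x => (st.1 ++ [st.2 + x], st.2 + x)) ([0], 0)).1)
          (max ((PySem.List.clampIdx s.length (b + m) : Nat) : Int) ((PySem.List.clampIdx s.length b : Nat) : Int)) 0
        - PySem.List.pyGetD ((s.foldl (fun (st : List Int × Int) x => (st.1 ++ [st.2 + x], st.2 + x)) ([0], 0)).1)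
          ((PySem.List.clampIdx s.length b : Nat) : Int) 0 := by
  have hmb : m + b = b + m := by ring
  rw [hmb]
  set lo := PySem.List.clampIdx s.length b with hlo
  set hi := PySem.List.clampIdx s.length (b + m) with hhi
  have hloL : lo ≤ s.length := PySem.List.clampIdx_le _ _
  have hhiL : hi ≤ s.length := PySem.List.clampIdx_le _ _
  have hmax : (max ((hi : Nat) : Int) ((lo : Nat) : Int)) = ((max hi lo : Nat) : Int) := by
    simp [Nat.cast_max]
  rw [hmax, pgetD_eq s (max hi lo) (by omega), pgetD_eq s lo hloL]
  simp only [PySem.List.slice, ← hlo, ← hhi]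
  rw [sum_take_drop s lo (hi - lo)]
  have h2 : lo + (hi - lo) = max hi lo := by omega
  rw [h2]

-- A's loop agrees with B's fold over the remaining range
theorem main_loop (s : List Int) (d m n : Int) : ∀ (b count : Int), 0 ≤ b →
    solveLoopA s d m n b count
      = (PySem.List.pyRange b n 1).foldl (fun count b =>
          let lo : Int := (PySem.List.clampIdx s.length b : Nat)
          let hi : Int := (PySem.List.clampIdx s.length (b + m) : Nat)
          if PySem.List.pyGetD ((s.foldl (fun (st : List Int × Int) x => (st.1 ++ [st.2 + x], st.2 + x)) ([0], 0)).1) (max hi lo) 0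
              - PySem.List.pyGetD ((s.foldl (fun (st : List Int × Int) x => (st.1 ++ [st.2 + x], st.2 + x)) ([0], 0)).1) lo 0 = d
          then count + 1 else count) count := by
  intro b count hb0
  induction hfuel : (n - b).toNat generalizing b count with
  | zero =>
    rw [solveLoopA, if_neg (by omega), PySem.List.pyRange_one_eq_nil (by omega), List.foldl_nil]
  | succ k ih =>
    have hbn : b < n := by omega
    rw [solveLoopA, if_pos hbn, window_eq s m b,
      PySem.List.pyRange_one_cons (by omega), List.foldl_cons]
    exact ih (b + 1) _ (by omega) (by omega)

-- ===== VERDICT =====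
theorem solve_spec : Claim_equal_solve := by
  intro n s d m _
  show solve n s d m = solve_alt n s d m
  unfold solve solve_alt
  exact main_loop s d m n 0 0 le_rfl
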